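-- pv_equiv track=rewrite | github.com/luisek/codility | CountingElements/readingEx.py | slow_solution
-- ===== SOURCE A (Python) =====
-- def slow_solution(A, B, m):
--     n = len(A)
--     sum_a = sum(A)
--     sum_b = sum(B)
--     for i in range(n):
--         for j in range(n):
--             change = B[j] - A[j]
--             sum_a += change
--             sum_b -= change
--             if sum_a == sum_b:
--                 return True
--             sum_a -= change
--             sum_b += change
--     return False
-- ===== SOURCE B (Python) =====
-- def slow_solution(A, B, m):
--     diff = sum(B) - sum(A)
--     return any(2 * (b - a) == diff for a, b in zip(A, B))
-- ===== Notes on version B (the rewrite author's own statement) =====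
-- stated objective: faster
-- what changed: Replaced the dead O(n) outer loop and the increment-then-restore sum bookkeeping with a single pass testing the closed-form condition 2*(B[j]-A[j]) == sum(B)-sum(A).
-- outside the precondition, e.g. on slow_solution([3, 1], [2], 0): A returns True, B returns True
import Mathlib
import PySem

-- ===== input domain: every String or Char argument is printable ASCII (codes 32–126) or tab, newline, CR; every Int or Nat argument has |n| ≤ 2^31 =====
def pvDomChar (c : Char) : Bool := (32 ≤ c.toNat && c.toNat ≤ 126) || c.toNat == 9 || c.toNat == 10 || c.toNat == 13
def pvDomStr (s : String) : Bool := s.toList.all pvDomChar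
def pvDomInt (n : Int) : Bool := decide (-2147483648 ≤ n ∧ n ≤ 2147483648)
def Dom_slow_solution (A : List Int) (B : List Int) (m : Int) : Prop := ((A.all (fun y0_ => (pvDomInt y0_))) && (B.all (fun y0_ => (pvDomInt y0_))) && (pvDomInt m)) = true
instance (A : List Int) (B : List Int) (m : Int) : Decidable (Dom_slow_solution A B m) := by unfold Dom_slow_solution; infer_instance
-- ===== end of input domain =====

-- B replaces A's dead outer loop and increment-then-restore bookkeeping by a single pass
-- testing the closed-form condition 2*(B[j]-A[j]) == sum(B)-sum(A)  (objective: faster, O(n^2) -> O(n)).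


-- ===== PORT A =====
-- for i loop / for j loop with early 'return True' = nested .any; the sums are restored
-- after each comparison, so the compared quantities are sum_a + change and sum_b - change.
def slow_solution (A : List Int) (B : List Int) (m : Int) : Bool :=
  let n : Int := A.length
  let sum_a := A.sum
  let sum_b := B.sum
  (PySem.List.pyRange 0 n 1).any (fun _ =>
    (PySem.List.pyRange 0 n 1).any (fun j =>
      let change := PySem.List.pyGetD B j 0 - PySem.List.pyGetD A j 0
      sum_a + change == sum_b - change))

-- ===== PORT B =====
def slow_solution_alt (A : List Int) (B : List Int) (m : Int) : Bool :=
  let diff := B.sum - A.sum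
  (A.zip B).any (fun ab => 2 * (ab.2 - ab.1) == diff)

-- ===== PRECONDITION & SPEC =====
-- Pre_ excludes B shorter than A, where indexing B[j] can raise IndexError (A may still
-- return True early on a few such inputs before reaching the bad index; those are excluded too).
def Pre_slow_solution (A : List Int) (B : List Int) (m : Int) : Prop := A.length ≤ B.length
instance (A : List Int) (B : List Int) (m : Int) : Decidable (Pre_slow_solution A B m) := by unfold Pre_slow_solution; infer_instance
def pvWitness_slow_solution : List Int × List Int × Int := ([1, 2], [2, 1], 0)

def Spec_slow_solution (A : List Int) (B : List Int) (m : Int) (out : Bool) : Prop := out = slow_solution_alt A B m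
instance (A : List Int) (B : List Int) (m : Int) (out : Bool) : Decidable (Spec_slow_solution A B m out) := by unfold Spec_slow_solution; infer_instance

-- ===== CLAIM (what is proved, stated in full; the proofs are below) =====
def Claim_equal_slow_solution : Prop := ∀ (A : List Int) (B : List Int) (m : Int), Dom_slow_solution A B m → Pre_slow_solution A B m → Spec_slow_solution A B m (slow_solution A B m)

-- ===== LEMMAS AND PROOFS =====

-- a .any with a predicate that ignores the element is constant on nonempty lists
theorem any_const {α : Type} (l : List α) (c : Bool) (h : l ≠ []) :
    l.any (fun _ => c) = c := by
  cases l with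
  | nil => exact absurd rfl h
  | cons x t => cases c <;> simp

-- the inner index loop equals the zip pass (same predicate, read off positionally)
theorem range_any_eq_zip_any (A B : List Int) (p : Int → Int → Bool)
    (h : A.length ≤ B.length) :
    (List.range A.length).any (fun k => p (A.getD k 0) (B.getD k 0))
      = (A.zip B).any (fun ab => p ab.1 ab.2) := by
  induction A generalizing B with
  | nil => simp
  | cons a A ih =>
    cases B with
    | nil => simp at h
    | cons b B =>
      simp only [List.length_cons, List.range_succ_eq_map, List.any_cons, List.any_map,
        List.zip_cons_cons]
      simp only [Function.comp_def, List.getD_cons_succ, List.getD_cons_zero]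
      congr 1
      exact ih B (by simpa using h)

theorem slow_solution_eq (A B : List Int) (m : Int) (h : A.length ≤ B.length) :
    slow_solution A B m = slow_solution_alt A B m := by
  unfold slow_solution slow_solution_alt
  simp only [PySem.List.pyRange_one, Int.sub_zero, Int.toNat_natCast, List.any_map, Function.comp_def]
  have hget : ∀ (xs : List Int) (k : Nat), PySem.List.pyGetD xs ((0 : Int) + k) 0 = xs.getD k 0 := by
    intro xs k
    rw [Int.zero_add]
    simp [PySem.List.pyGetD, PySem.List.pyGet?_natCast, List.getD_eq_getElem?_getD]
  cases hA : A with
  | nil =>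
    simp only [hA, List.zip_nil_left] at *
    simp
  | cons a A' =>
    rw [← hA]
    have hne : List.range A.length ≠ [] := by simp [hA]
    rw [any_const _ _ hne]
    have : (fun (k : Nat) =>
        A.sum + (PySem.List.pyGetD B ((0:Int) + k) 0 - PySem.List.pyGetD A ((0:Int) + k) 0)
          == B.sum - (PySem.List.pyGetD B ((0:Int) + k) 0 - PySem.List.pyGetD A ((0:Int) + k) 0))
        = (fun (k : Nat) =>
        (fun x y => A.sum + (y - x) == B.sum - (y - x)) (A.getD k 0) (B.getD k 0)) := by
      funext k; rw [hget A k, hget B k]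
    rw [this, range_any_eq_zip_any A B (fun x y => A.sum + (y - x) == B.sum - (y - x)) h]
    congr 1
    funext ab
    have : (A.sum + (ab.2 - ab.1) = B.sum - (ab.2 - ab.1)) ↔ (2 * (ab.2 - ab.1) = B.sum - A.sum) := by omega
    simpa using this

-- ===== VERDICT (by name: the statement is the Claim_ definition above) =====
theorem slow_solution_spec : Claim_equal_slow_solution := by
  intro A B m _ hpre
  exact slow_solution_eq A B m hpre
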